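-- pv_equiv track=rewrite | github.com/bazad/ida_kernelcache | kernelcache_metaclass_symbols.py | kernelcache_metaclass_symbol_for_class
-- ===== SOURCE A (Python) =====
-- def kernelcache_metaclass_instance_name_for_class(classname):
--     """Return the name of the C++ metaclass instance for the given class."""
--     if '::' in classname:
--         return None
--     return classname + '::gMetaClass'
--
-- def kernelcache_metaclass_symbol_for_class(classname):
--     """Get the symbol name for the OSMetaClass instance for the given class name.
--
--     Arguments:
--         classname: The name of the C++ class.
--
--     Returns:
--         The symbol name, or None if the classname is invalid.
--     """
--     metaclass_instance = kernelcache_metaclass_instance_name_for_class(classname)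
--     if not metaclass_instance:
--         return None
--     scopes = metaclass_instance.split('::')
--     symbol = '__Z'
--     if len(scopes) > 1:
--         symbol += 'N'
--     for name in scopes:
--         if len(name) == 0:
--             return None
--         symbol += '{}{}'.format(len(name), name)
--     if len(scopes) > 1:
--         symbol += 'E'
--     return symbol
-- ===== SOURCE B (Python) =====
-- def kernelcache_metaclass_symbol_for_class(classname):
--     """Get the symbol name for the OSMetaClass instance for the given class name.
--
--     A valid C++ class name contains no ':' at all; it contributes exactly two
--     mangled components, the classname itself and the fixed 'gMetaClass' (length 10).
--     """
--     if ':' in classname or not classname: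
--         return None
--     return '__ZN{}{}10gMetaClassE'.format(len(classname), classname)
-- ===== Notes on version B (the rewrite author's own statement) =====
-- stated objective: simpler
-- what changed: B drops the helper, the '::'-split and the per-scope loop: it rejects any classname containing ':' (or empty) and otherwise computes the symbol in closed form as '__ZN'+len+classname+'10gMetaClassE'.
-- intended difference: On classnames of length >= 2 that contain ':' but not '::', A splices the colon into a malformed mangled symbol (e.g. '__ZN1A11:gMetaClassE' for 'A:'), while B returns None, the documented result for an invalid class name, since ':' cannot occur in a C++ identifier. — e.g. on kernelcache_metaclass_symbol_for_class("A:"): A returns some "__ZN1A11:gMetaClassE", B returns none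
import Mathlib
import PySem

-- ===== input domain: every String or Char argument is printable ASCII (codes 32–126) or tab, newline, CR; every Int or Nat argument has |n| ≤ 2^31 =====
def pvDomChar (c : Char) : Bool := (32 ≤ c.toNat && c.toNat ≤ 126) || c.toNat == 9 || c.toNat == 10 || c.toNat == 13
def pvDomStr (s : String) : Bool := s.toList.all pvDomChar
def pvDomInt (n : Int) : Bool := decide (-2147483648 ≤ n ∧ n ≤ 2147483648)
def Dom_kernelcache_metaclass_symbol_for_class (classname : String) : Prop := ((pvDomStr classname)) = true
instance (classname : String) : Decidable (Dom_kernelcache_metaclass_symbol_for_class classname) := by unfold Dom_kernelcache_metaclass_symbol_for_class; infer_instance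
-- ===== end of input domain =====

-- B replaces A's helper + '::'-split + per-scope loop by a single validity test (any ':'
-- rejects) and the closed form '__ZN'+len+classname+'10gMetaClassE' (simpler); the difference
-- on ':'-containing classnames is stated as D_ below.

-- ===== PORT A =====
-- kernelcache_metaclass_instance_name_for_class (strings carried as List Char)
def pvMetaclassInstance (classname : String) : Option (List Char) :=
  if PySem.Str.isIn "::" classname then none
  else some (classname.toList ++ "::gMetaClass".toList)

-- the 'for name in scopes' loop with its early 'return None'
def pvSymLoop : List (List Char) → List Char → Option (List Char)
  | [], sym => some sym
  | name :: rest, sym =>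
      if PySem.Chars.len name = 0 then none
      else pvSymLoop rest (sym ++ PySem.Int.toChars (PySem.Chars.len name) ++ name)

def kernelcache_metaclass_symbol_for_class (classname : String) : Option String :=
  match pvMetaclassInstance classname with
  | none => none
  | some mi =>
      if mi.length = 0 then none  -- 'if not metaclass_instance': empty-string falsiness
      else
        let scopes := PySem.Chars.splitOn mi "::".toList
        let symbol := "__Z".toList
        let symbol := if scopes.length > 1 then symbol ++ ['N'] else symbol
        match pvSymLoop scopes symbol with
        | none => none
        | some sym => some (String.ofList (if scopes.length > 1 then sym ++ ['E'] else sym))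

-- ===== PORT B =====
def kernelcache_metaclass_symbol_for_class_alt (classname : String) : Option String :=
  if PySem.Str.isIn ":" classname || classname.toList.length = 0 then none
  else some (String.ofList ("__ZN".toList ++ PySem.Int.toChars (PySem.Chars.len classname.toList)
              ++ classname.toList ++ "10gMetaClassE".toList))

-- ===== PRECONDITION & SPEC =====
-- On classnames of length >= 2 that contain ':' but not '::', A splices the colon into a
-- malformed mangled symbol (e.g. '__ZN1A11:gMetaClassE' for 'A:'), while B returns None,
-- the documented result for an invalid class name, since ':' cannot occur in a C++ identifier.
def D_kernelcache_metaclass_symbol_for_class (classname : String) : Prop :=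
  PySem.Str.isIn ":" classname = true ∧ PySem.Str.isIn "::" classname = false ∧
    2 ≤ classname.toList.length
instance (classname : String) : Decidable (D_kernelcache_metaclass_symbol_for_class classname) := by
  unfold D_kernelcache_metaclass_symbol_for_class; infer_instance

def Spec_kernelcache_metaclass_symbol_for_class (classname : String) (out : Option String) : Prop :=
  ¬ D_kernelcache_metaclass_symbol_for_class classname → out = kernelcache_metaclass_symbol_for_class_alt classname
instance (classname : String) (out : Option String) : Decidable (Spec_kernelcache_metaclass_symbol_for_class classname out) := by
  unfold Spec_kernelcache_metaclass_symbol_for_class; infer_instance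

def pvDiffWitness_kernelcache_metaclass_symbol_for_class : String := "A:"
def pvDiffWitnessOut_kernelcache_metaclass_symbol_for_class : (Option String) × (Option String) :=
  (some "__ZN1A11:gMetaClassE", none)

-- ===== CLAIM (what is proved, stated in full; the proofs are below) =====
def Claim_unchanged_kernelcache_metaclass_symbol_for_class : Prop := ∀ (classname : String), Dom_kernelcache_metaclass_symbol_for_class classname → Spec_kernelcache_metaclass_symbol_for_class classname (kernelcache_metaclass_symbol_for_class classname)
def Claim_changed_kernelcache_metaclass_symbol_for_class : Prop := Dom_kernelcache_metaclass_symbol_for_class (pvDiffWitness_kernelcache_metaclass_symbol_for_class) ∧ D_kernelcache_metaclass_symbol_for_class (pvDiffWitness_kernelcache_metaclass_symbol_for_class) ∧ kernelcache_metaclass_symbol_for_class (pvDiffWitness_kernelcache_metaclass_symbol_for_class) = pvDiffWitnessOut_kernelcache_metaclass_symbol_for_class.1 ∧ kernelcache_metaclass_symbol_for_class_alt (pvDiffWitness_kernelcache_metaclass_symbol_for_class) = pvDiffWitnessOut_kernelcache_metaclass_symbol_for_class.2 ∧ pvDiffWitnessOut_kernelcache_metaclass_symbol_for_class.1 ≠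 pvDiffWitnessOut_kernelcache_metaclass_symbol_for_class.2
def Claim_exact_kernelcache_metaclass_symbol_for_class : Prop := ∀ (classname : String), Dom_kernelcache_metaclass_symbol_for_class classname → D_kernelcache_metaclass_symbol_for_class classname → kernelcache_metaclass_symbol_for_class classname ≠ kernelcache_metaclass_symbol_for_class_alt classname

-- ===== LEMMAS AND PROOFS =====

-- a ':' occurring in l makes [':'] an infix of l
lemma pvColonInfix {l : List Char} (h : ':' ∈ l) : ([':'] : List Char) <:+: l := by
  obtain ⟨s, t, rfl⟩ := List.append_of_mem h
  exact ⟨s, t, by simp⟩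

-- '::' infix gives a ':' member
lemma pvColonMemOfDouble {l : List Char} (h : ([':', ':'] : List Char) <:+: l) : ':' ∈ l := by
  obtain ⟨s, t, rfl⟩ := h
  simp

-- splitOn.go skips a block in which no occurrence of the separator starts
lemma pvGoSkip (sep l rest cur : List Char) (acc : List (List Char)) (fuel : Nat)
    (hf : l.length ≤ fuel)
    (h : ∀ n, n < l.length → ¬ sep <+: (l.drop n ++ rest)) :
    PySem.Chars.splitOn.go sep fuel (l ++ rest) cur acc
      = PySem.Chars.splitOn.go sep (fuel - l.length) rest (l.reverse ++ cur) acc := by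
  induction l generalizing fuel cur with
  | nil => simp
  | cons c tl ih =>
    obtain ⟨f, rfl⟩ : ∃ f, fuel = f + 1 := ⟨fuel - 1, by simp at hf; omega⟩
    have hpre' : ¬ sep <+: c :: (tl ++ rest) := by simpa using h 0 (by simp)
    have hpre : sep.isPrefixOf (c :: (tl ++ rest)) = false := by
      rw [Bool.eq_false_iff]
      intro hh
      exact hpre' (List.isPrefixOf_iff_prefix.mp hh)
    rw [List.cons_append, PySem.Chars.splitOn.go]
    simp only [hpre, Bool.false_eq_true, if_false]
    rw [ih (fuel := f) (cur := c :: cur) (by simp at hf ⊢; omega)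
        (fun n hn => h (n+1) (by simpa using Nat.succ_lt_succ hn))]
    have hfe : f + 1 - (c :: tl).length = f - tl.length := by simp only [List.length_cons]; omega
    rw [hfe]
    simp [List.append_assoc]

-- the central fact: for a valid classname, the split yields exactly [classname, "gMetaClass"]
lemma pvSplitJunction (l : List Char)
    (h1 : PySem.Chars.isIn [':', ':'] l = false)
    (h2 : PySem.Chars.endswith l [':'] = false) :
    PySem.Chars.splitOn (l ++ [':', ':', 'g', 'M', 'e', 't', 'a', 'C', 'l', 'a', 's', 's']) [':', ':']
      = [l, ['g', 'M', 'e', 't', 'a', 'C', 'l', 'a', 's', 's']] := by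
  show PySem.Chars.splitOn (l ++ "::gMetaClass".toList) "::".toList = [l, "gMetaClass".toList]
  have h1 : PySem.Chars.isIn "::".toList l = false := h1
  have h2 : PySem.Chars.endswith l ":".toList = false := h2
  have hnotin : ¬ ("::".toList <:+: l) := (PySem.Chars.isIn_eq_false_iff _ _).mp h1
  have hnotend : ¬ (":".toList <:+ l) := by
    intro hsuf
    have h3 := (PySem.Chars.endswith_iff l ":".toList).mpr hsuf
    rw [h2] at h3
    exact Bool.false_ne_true h3
  have hsep : ("::".toList : List Char) = [':', ':'] := rfl
  have hcond : ∀ n, n < l.length → ¬ ("::".toList <+: (l.drop n ++ "::gMetaClass".toList)) := by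
    intro n hn hpre
    rw [hsep] at hpre
    have hsuf : l.drop n <:+ l := List.drop_suffix n l
    match hdrop : l.drop n with
    | [] =>
      have := List.drop_eq_nil_iff.mp hdrop
      omega
    | [a] =>
      rw [hdrop] at hpre hsuf
      simp only [List.cons_append, List.cons_prefix_cons] at hpre
      refine hnotend ?_
      have hx : (":".toList : List Char) = [a] := by
        show [':'] = [a]
        rw [hpre.1]
      rw [hx]
      exact hsuf
    | a :: b :: t =>
      rw [hdrop] at hpre hsuf
      simp only [List.cons_append, List.cons_prefix_cons] at hpre
      refine hnotin ?_
      refine List.IsPrefix.isInfix ?_ |>.trans hsuf.isInfix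
      rw [hsep, ← hpre.1, ← hpre.2.1]
      simp [List.cons_prefix_cons]
  unfold PySem.Chars.splitOn
  rw [pvGoSkip _ _ _ _ _ _ (by simp; omega) hcond]
  have hfuel : (l ++ "::gMetaClass".toList).length + 1 - l.length = 13 := by simp; omega
  rw [hfuel]
  have hsepG : ("::gMetaClass".toList : List Char) = ':' :: ':' :: "gMetaClass".toList := rfl
  rw [hsepG, hsep, PySem.Chars.splitOn.go]
  simp only [List.isPrefixOf, beq_self_eq_true, Bool.and_self, if_true, List.length_cons,
    List.length_nil, List.drop_succ_cons, List.drop_zero, List.reverse_reverse, List.append_nil]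
  have hskip := pvGoSkip [':', ':'] "gMetaClass".toList [] [] [l] 12 (by decide) (by decide)
  rw [show ("gMetaClass".toList : List Char).length = 10 from rfl] at hskip
  norm_num at hskip
  rw [hskip, PySem.Chars.splitOn.go]
  all_goals simp

-- with a trailing ':', the separator is found one character early, splitting off the ':'
lemma pvSplitJunctionColon (l' : List Char)
    (hinfix : ¬ ([':', ':'] <:+: (l' ++ [':']))) :
    PySem.Chars.splitOn ((l' ++ [':']) ++ [':', ':', 'g', 'M', 'e', 't', 'a', 'C', 'l', 'a', 's', 's']) [':', ':']
      = [l', ':' :: ['g', 'M', 'e', 't', 'a', 'C', 'l', 'a', 's', 's']] := by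
  have hnotin : ¬ ([':', ':'] <:+: l') := fun h => hinfix (h.trans (List.prefix_append l' [':']).isInfix)
  have hnotend : ¬ ([':'] <:+ l') := by
    intro h
    obtain ⟨t, ht⟩ := h
    refine hinfix ?_
    have : l' ++ [':'] = t ++ [':', ':'] := by rw [← ht]; simp
    rw [this]
    exact (List.suffix_append t [':', ':']).isInfix
  have hassoc : (l' ++ [':']) ++ [':', ':', 'g', 'M', 'e', 't', 'a', 'C', 'l', 'a', 's', 's']
      = l' ++ (':' :: ':' :: ':' :: ['g', 'M', 'e', 't', 'a', 'C', 'l', 'a', 's', 's']) := by simp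
  rw [hassoc]
  have hcond : ∀ n, n < l'.length →
      ¬ ([':', ':'] <+: (l'.drop n ++ (':' :: ':' :: ':' :: ['g', 'M', 'e', 't', 'a', 'C', 'l', 'a', 's', 's']))) := by
    intro n hn hpre
    have hsuf : l'.drop n <:+ l' := List.drop_suffix n l'
    match hdrop : l'.drop n with
    | [] =>
      have := List.drop_eq_nil_iff.mp hdrop
      omega
    | [a] =>
      rw [hdrop] at hpre hsuf
      simp only [List.cons_append, List.cons_prefix_cons] at hpre
      refine hnotend ?_
      have hx : ([':'] : List Char) = [a] := by rw [hpre.1]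
      rw [hx]
      exact hsuf
    | a :: b :: t =>
      rw [hdrop] at hpre hsuf
      simp only [List.cons_append, List.cons_prefix_cons] at hpre
      refine hnotin ?_
      refine List.IsPrefix.isInfix ?_ |>.trans hsuf.isInfix
      rw [← hpre.1, ← hpre.2.1]
      simp [List.cons_prefix_cons]
  unfold PySem.Chars.splitOn
  rw [pvGoSkip _ _ _ _ _ _ (by simp; omega) hcond]
  have hfuel : (l' ++ (':' :: ':' :: ':' :: ['g', 'M', 'e', 't', 'a', 'C', 'l', 'a', 's', 's'])).length + 1 - l'.length = 14 := by
    simp; omega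
  rw [hfuel, PySem.Chars.splitOn.go]
  simp only [List.isPrefixOf, beq_self_eq_true, Bool.and_self, if_true, List.length_cons,
    List.length_nil, List.drop_succ_cons, List.drop_zero, List.reverse_reverse, List.append_nil]
  have hskip := pvGoSkip [':', ':'] (':' :: ['g', 'M', 'e', 't', 'a', 'C', 'l', 'a', 's', 's']) [] [] [l'] 13
    (by decide) (by decide)
  rw [show ((':' :: ['g', 'M', 'e', 't', 'a', 'C', 'l', 'a', 's', 's'] : List Char)).length = 11 from rfl] at hskip
  norm_num at hskip
  rw [hskip, PySem.Chars.splitOn.go]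
  all_goals simp

-- ===== VERDICT (by name: the statement is the Claim_ definition above) =====
theorem kernelcache_metaclass_symbol_for_class_spec : Claim_unchanged_kernelcache_metaclass_symbol_for_class := by
  intro classname _ hD
  unfold kernelcache_metaclass_symbol_for_class kernelcache_metaclass_symbol_for_class_alt pvMetaclassInstance
  by_cases hcc : PySem.Str.isIn "::" classname = true
  · -- '::' present: both None
    have hccC : PySem.Chars.isIn [':', ':'] classname.toList = true := by simpa using hcc
    have hmem : ':' ∈ classname.toList :=
      pvColonMemOfDouble ((PySem.Chars.isIn_iff_infix _ _).mp hccC)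
    have hcC : PySem.Chars.isIn [':'] classname.toList = true :=
      (PySem.Chars.isIn_iff_infix _ _).mpr (pvColonInfix hmem)
    simp [hccC, hcC]
  · have hcc' : PySem.Str.isIn "::" classname = false := by simpa using hcc
    have hccC : PySem.Chars.isIn [':', ':'] classname.toList = false := by simpa using hcc'
    by_cases hc : PySem.Chars.isIn [':'] classname.toList = true
    · -- a lone ':' without '::': ¬D forces classname = ":"; both None
      have hlen : classname.toList.length < 2 := by
        by_contra hge
        exact hD ⟨by simpa using hc, hcc', by omega⟩
      have hmem : ':' ∈ classname.toList := by
        have := (PySem.Chars.isIn_iff_infix _ _).mp hc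
        obtain ⟨s, t, hst⟩ := this
        rw [← hst]; simp
      have hone : classname.toList = [':'] := by
        match hl : classname.toList with
        | [] => rw [hl] at hmem; simp at hmem
        | [a] =>
          rw [hl] at hmem
          simp at hmem
          rw [hmem]
        | a :: b :: t => rw [hl] at hlen; simp at hlen
      have hcol : classname = ":" := String.ext (by simpa using hone)
      subst hcol
      decide
    · -- no ':' at all
      have hc' : PySem.Chars.isIn [':'] classname.toList = false := by simpa using hc
      have hnomem : ':' ∉ classname.toList := fun hm =>
        absurd ((PySem.Chars.isIn_iff_infix _ _).mpr (pvColonInfix hm)) (by simp [hc'])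
      have h2 : PySem.Chars.endswith classname.toList [':'] = false := by
        rw [Bool.eq_false_iff]
        intro h
        obtain ⟨t, ht⟩ := (PySem.Chars.endswith_iff _ _).mp h
        exact hnomem (by rw [← ht]; simp)
      have hkey := pvSplitJunction classname.toList hccC h2
      by_cases hnil : classname = ""
      · subst hnil; decide
      · have hlist : classname.toList ≠ [] := by simpa using hnil
        simp [hccC, hc', hkey, hnil, pvSymLoop, PySem.Chars.len_eq]
        rw [show PySem.Int.toChars 10 = ['1', '0'] from by decide]
        simp

theorem kernelcache_metaclass_symbol_for_class_changed : Claim_changed_kernelcache_metaclass_symbol_for_class := by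
  unfold Claim_changed_kernelcache_metaclass_symbol_for_class; decide

theorem kernelcache_metaclass_symbol_for_class_tight : Claim_exact_kernelcache_metaclass_symbol_for_class := by
  intro classname _ hD
  obtain ⟨h1, h2, hlen⟩ := hD
  have h1C : PySem.Chars.isIn [':'] classname.toList = true := by simpa using h1
  have h2C : PySem.Chars.isIn [':', ':'] classname.toList = false := by simpa using h2
  have hBnone : kernelcache_metaclass_symbol_for_class_alt classname = none := by
    unfold kernelcache_metaclass_symbol_for_class_alt
    simp [h1C]
  rw [hBnone]
  unfold kernelcache_metaclass_symbol_for_class pvMetaclassInstance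
  by_cases hend : PySem.Chars.endswith classname.toList [':'] = true
  · obtain ⟨l', hl'⟩ := (PySem.Chars.endswith_iff _ _).mp hend
    have hinfix : ¬ ([':', ':'] <:+: (l' ++ [':'])) := by
      rw [hl']
      exact (PySem.Chars.isIn_eq_false_iff _ _).mp h2C
    have hkey := pvSplitJunctionColon l' hinfix
    rw [hl'] at hkey
    have hl0 : l' ≠ [] := by
      intro h
      rw [h] at hl'
      rw [← hl'] at hlen
      simp at hlen
    have hnil : classname ≠ "" := by intro h; subst h; simp at hlen
    simp [h2C, hkey, pvSymLoop, PySem.Chars.len_eq, hl0, hnil]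
  · have hend' : PySem.Chars.endswith classname.toList [':'] = false := by simpa using hend
    have hkey := pvSplitJunction classname.toList h2C hend'
    have hnil : classname ≠ "" := by intro h; subst h; simp at hlen
    simp [h2C, hkey, pvSymLoop, PySem.Chars.len_eq, hnil]
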